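-- pv_equiv track=rewrite | github.com/GeorgiiBunin/StepicAlgorithms | src/Lesson2_Greedy/2.3.Numbers.py | find_sums
-- ===== SOURCE A (Python) =====
-- def find_sums(m: int):
--     """
--
--     :param m: an integer between 1 and 10^9
--     :return: maximal set of different summands
--     """
--     res = []
--     i = 0
--     sum_els = 0
--     # sum integers one by one until the sum is greater than number given
--     while sum_els < m:
--         res.append(i)
--         sum_els += i
--         i += 1
--         if sum_els == m:
--             del res[0]
--             return res
--     d = len(res)
--     # delete last added summand and try to increase the summand before that
--     # repeat until we get the desired result
--     for i in range(d, 0, -1):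
--         sum_els -= res[-1]
--         del res[-1]
--         while sum_els < m:
--             res[-1] += 1
--             sum_els += 1
--             if sum_els == m:
--                 del res[0]
--                 return res
-- ===== SOURCE B (Python) =====
-- def find_sums(m: int):
--     """Closed-form construction: find the largest k whose triangular number
--     is at most m, then return the consecutive summands with the remainder
--     folded into the last one."""
--     if m <= 0:
--         return None
--     k = 1
--     while (k + 1) * (k + 2) // 2 <= m:
--         k += 1
--     r = m - k * (k + 1) // 2
--     return list(range(1, k)) + [k + r]
-- ===== Notes on version B (the rewrite author's own statement) =====
-- stated objective: simpler
-- what changed: Replaces A's build-a-list-then-delete-and-increment search (two phases of list surgery) by directly computing the largest k whose triangular number is at most m and emitting the consecutive summands with the remainder folded into the last one.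
-- outside the precondition, e.g. on find_sums(0): A returns None, B returns None
import Mathlib
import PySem

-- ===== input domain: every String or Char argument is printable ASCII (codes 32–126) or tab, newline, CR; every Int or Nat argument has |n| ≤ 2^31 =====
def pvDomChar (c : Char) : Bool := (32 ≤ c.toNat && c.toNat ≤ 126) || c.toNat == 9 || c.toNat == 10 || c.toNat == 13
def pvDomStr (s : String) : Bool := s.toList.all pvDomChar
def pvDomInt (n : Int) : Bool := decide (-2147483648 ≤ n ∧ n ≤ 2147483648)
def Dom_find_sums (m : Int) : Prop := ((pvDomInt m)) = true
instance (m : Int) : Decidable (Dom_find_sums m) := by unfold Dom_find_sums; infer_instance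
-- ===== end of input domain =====

-- B replaces A's build-then-decrement list surgery by finding the largest k with
-- k(k+1)/2 ≤ m and returning [1,…,k-1, k+remainder] directly (objective: simpler).

-- ===== PORT A =====
-- inner 'while sum_els < m' loop of A's second phase: res[-1] += 1; sum_els += 1;
-- returns some (res[1:]) when sum_els == m; fuel only makes the recursion structural
def fsInner (m : Int) : Nat → List Int → Int → Option (List Int)
  | 0, _, _ => none
  | fuel+1, res, s =>
    if s < m then
      match res.getLast? with
      | none => none     -- Python's res[-1] would raise IndexError; unreachable for m ≥ 1
      | some a =>
        let res' := res.dropLast ++ [a + 1]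
        if s + 1 = m then some res'.tail
        else fsInner m fuel res' (s + 1)
    else none

-- outer 'for i in range(d, 0, -1)' loop of A: drop res[-1], subtract it, run the inner loop
def fsOuter (m : Int) : Nat → List Int → Int → List Int
  | 0, _, _ => []       -- loop ends without return: Python A returns None; unreachable for m ≥ 1
  | fuel+1, res, s =>
    match res.getLast? with
    | none => []        -- Python's res[-1] would raise IndexError; unreachable for m ≥ 1
    | some last =>
      let res' := res.dropLast
      let s' := s - last
      match fsInner m (m - s').toNat res' s' with
      | some r => r
      | none => fsOuter m fuel res' s'

-- first 'while sum_els < m' loop of A: append i, sum_els += i, i += 1;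
-- Sum.inr = early 'del res[0]; return res', Sum.inl = loop exit with (res, sum_els)
def fsPhase1 (m : Int) : Nat → List Int → Int → Int → (List Int × Int) ⊕ List Int
  | 0, res, _, s => Sum.inl (res, s)
  | fuel+1, res, i, s =>
    if s < m then
      let res' := res ++ [i]
      let s' := s + i
      if s' = m then Sum.inr res'.tail
      else fsPhase1 m fuel res' (i + 1) s'
    else Sum.inl (res, s)

def find_sums (m : Int) : List Int :=
  match fsPhase1 m (m.toNat + 2) [] 0 0 with
  | Sum.inr r => r
  | Sum.inl (res, s) => fsOuter m res.length res s

-- ===== PORT B =====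
-- Source B's 'while (k+1)*(k+2)//2 <= m: k += 1'
def fsAltK (m : Int) : Nat → Int → Int
  | 0, k => k
  | fuel+1, k =>
    if PySem.Int.floordiv ((k + 1) * (k + 2)) 2 ≤ m then fsAltK m fuel (k + 1)
    else k

def find_sums_alt (m : Int) : List Int :=
  if m ≤ 0 then []     -- Source B returns None here; excluded by Pre_find_sums
  else
    let k := fsAltK m m.toNat 1
    let r := m - PySem.Int.floordiv (k * (k + 1)) 2
    PySem.List.pyRange 1 k 1 ++ [k + r]

-- ===== PRECONDITION & SPEC =====
-- Pre_ excludes m ≤ 0, where A falls off the end and returns None, not a list of ints.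
def Pre_find_sums (m : Int) : Prop := 1 ≤ m
instance (m : Int) : Decidable (Pre_find_sums m) := by unfold Pre_find_sums; infer_instance
def pvWitness_find_sums : Int := 7

def Spec_find_sums (m : Int) (out : List Int) : Prop := out = find_sums_alt m
instance (m : Int) (out : List Int) : Decidable (Spec_find_sums m out) := by unfold Spec_find_sums; infer_instance

-- ===== CLAIM (what is proved, stated in full; the proofs are below) =====
def Claim_equal_find_sums : Prop := ∀ (m : Int), Dom_find_sums m → Pre_find_sums m → Spec_find_sums m (find_sums m)

-- ===== LEMMAS AND PROOFS =====

-- triS n = 1 + 2 + ... + n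
def triS : Nat → Int
  | 0 => 0
  | n+1 => triS n + (n+1)

-- ramp n = [0, 1, ..., n-1]
def ramp : Nat → List Int
  | 0 => []
  | n+1 => ramp n ++ [(n : Int)]

theorem le_triS : ∀ n : Nat, (n : Int) ≤ triS n := by
  intro n; induction n with
  | zero => simp [triS]
  | succ k ih => simp only [triS]; push_cast; omega

theorem triS_nonneg (n : Nat) : 0 ≤ triS n := le_trans (by positivity) (le_triS n)

theorem triS_mono : ∀ {i j : Nat}, i ≤ j → triS i ≤ triS j := by
  intro i j h
  induction j with
  | zero => simp_all
  | succ k ih =>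
    rcases Nat.lt_or_ge i (k+1) with hlt | hge
    · have := ih (by omega); simp only [triS]; omega
    · have : i = k+1 := by omega
      simp [this]

theorem triS_mul : ∀ n : Nat, (n : Int) * ((n : Int) + 1) = 2 * triS n := by
  intro n; induction n with
  | zero => simp [triS]
  | succ k ih => simp only [triS]; push_cast; push_cast at ih; ring_nf; ring_nf at ih; omega

theorem floordiv_two_mul (t : Int) : PySem.Int.floordiv (2 * t) 2 = t := by
  rw [PySem.Int.floordiv_eq_iff_of_pos (by omega)]; omega

theorem ramp_ne_nil (n : Nat) (h : 1 ≤ n) : ramp n ≠ [] := by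
  cases n with
  | zero => omega
  | succ k => simp [ramp]

theorem pyRange_ramp : ∀ n : Nat, 1 ≤ n → PySem.List.pyRange 1 (n : Int) 1 = (ramp n).tail := by
  intro n
  induction n with
  | zero => omega
  | succ k ih =>
    intro _
    rcases Nat.lt_or_ge k 1 with hk | hk
    · interval_cases k
      simp [ramp, PySem.List.pyRange_one_eq_nil (by omega : (1:Int) ≤ 1)]
    · have h1 : ((k:Int)+1) = ((k+1 : Nat) : Int) := by push_cast; ring
      have : PySem.List.pyRange 1 ((k:Int)+1) 1 = PySem.List.pyRange 1 (k:Int) 1 ++ [(k:Int)] :=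
        PySem.List.pyRange_one_succ_right (by exact_mod_cast hk)
      rw [show ((k+1 : Nat) : Int) = (k:Int)+1 by push_cast; ring, this, ih hk]
      simp [ramp, List.tail_append_of_ne_nil (ramp_ne_nil k hk)]

-- B's loop finds some K with triS K ≤ m < triS (K+1)
theorem altK_loop (m : Int) : ∀ (fuel n : Nat), 1 ≤ n → triS n ≤ m → m ≤ (n:Int) + fuel →
    ∃ K : Nat, 1 ≤ K ∧ fsAltK m fuel (n:Int) = (K:Int) ∧ triS K ≤ m ∧ m < triS (K+1) := by
  intro fuel
  induction fuel with
  | zero =>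
    intro n h1 hle hf
    refine ⟨n, h1, rfl, hle, ?_⟩
    have := triS_nonneg n
    simp only [triS]; push_cast at hf ⊢; omega
  | succ f ih =>
    intro n h1 hle hf
    have hcond : PySem.Int.floordiv (((n:Int) + 1) * ((n:Int) + 2)) 2 = triS (n+1) := by
      have := triS_mul (n+1)
      push_cast at this
      rw [show ((n:Int) + 1) * ((n:Int) + 2) = ((n:Int)+1) * (((n:Int)+1) + 1) by ring, this]
      exact floordiv_two_mul _
    simp only [fsAltK, hcond]
    split_ifs with h
    · have : (n:Int) + 1 = ((n+1 : Nat) : Int) := by push_cast; ring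
      rw [this]
      exact ih (n+1) (by omega) h (by push_cast; push_cast at hf; omega)
    · exact ⟨n, h1, rfl, hle, by omega⟩

-- A's inner while loop: increments the last element r times, then returns res[1:]
theorem inner_loop (m : Int) : ∀ (r : Nat) (xs : List Int) (a s : Int) (fuel : Nat),
    s + (r:Int) = m → 1 ≤ r → r ≤ fuel →
    fsInner m fuel (xs ++ [a]) s = some ((xs ++ [a + r]).tail) := by
  intro r
  induction r with
  | zero => omega
  | succ r' ih =>
    intro xs a s fuel hsum h1 hfuel
    cases fuel with
    | zero => omega
    | succ f =>
      have hs : s < m := by push_cast at hsum; omega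
      simp only [fsInner, if_pos hs, List.getLast?_concat, List.dropLast_concat]
      split_ifs with h
      · have : r' = 0 := by push_cast at hsum; omega
        subst this; norm_num
      · have hr' : 1 ≤ r' := by
          rcases Nat.eq_zero_or_pos r' with h0 | h0
          · exfalso; subst h0; push_cast at hsum; omega
          · omega
        rw [ih xs (a+1) (s+1) f (by push_cast at hsum ⊢; omega) hr' (by omega)]
        congr 2
        push_cast; ring

-- A's first loop, from the state after appending 0..j (so res = ramp (j+1), sum_els = triS j)
theorem phase1_loop (m : Int) (K : Nat) (hKle : triS K ≤ m) (hKlt : m < triS (K+1)) :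
    ∀ (fuel j : Nat), j ≤ K → triS j < m → K + 1 ≤ fuel + j →
    fsPhase1 m fuel (ramp (j+1)) ((j:Int)+1) (triS j) =
      (if m = triS K then Sum.inr (ramp (K+1)).tail else Sum.inl (ramp (K+2), triS (K+1))) := by
  intro fuel
  induction fuel with
  | zero => intro j hj hlt hf; omega
  | succ f ih =>
    intro j hj hlt hf
    simp only [fsPhase1, if_pos hlt]
    have hres : ramp (j+1) ++ [(j:Int)+1] = ramp (j+2) := by
      simp [ramp]
    have hsum : triS j + ((j:Int)+1) = triS (j+1) := by simp [triS]
    rw [hres, hsum]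
    by_cases heq : triS (j+1) = m
    · -- early return: j+1 = K and m = triS K
      rw [if_pos heq]
      have hjK : j + 1 = K := by
        by_contra hne
        rcases Nat.lt_or_ge (j+1) K with hlt2 | hge2
        · have h1 : triS (j+1+1) ≤ triS K := triS_mono (by omega)
          have h2 : triS (j+1) < triS (j+1+1) := by
            simp only [triS]; push_cast; omega
          omega
        · have h1 : triS (K+1) ≤ triS (j+1) := triS_mono (by omega)
          omega
      have hmK : m = triS K := by rw [← hjK]; omega
      rw [if_pos hmK, show j+2 = K+1 by omega]
    · rw [if_neg heq]
      rcases Nat.lt_or_ge j K with hjlt | hjge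
      · -- continue looping
        have hstep : triS (j+1) < m := by
          have h1 : triS (j+1) ≤ triS K := triS_mono (by omega)
          omega
        have h2 := ih (j+1) (by omega) hstep (by omega)
        rw [show (j:Int)+1+1 = ((j+1:Nat):Int)+1 by push_cast; ring, h2]
      · -- j = K : next state has sum triS (K+1) > m, loop exits (any fuel)
        have hjK : j = K := by omega
        subst hjK
        rw [if_neg (by omega : ¬ m = triS j)]
        cases f with
        | zero => simp [fsPhase1]
        | succ f' => simp [fsPhase1, if_neg (by omega : ¬ triS (j+1) < m)]

theorem ramp_getLast? (n : Nat) : (ramp (n+1)).getLast? = some (n:Int) := by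
  simp [ramp]

theorem ramp_dropLast (n : Nat) : (ramp (n+1)).dropLast = ramp n := by
  simp [ramp]

theorem ramp_length : ∀ n : Nat, (ramp n).length = n := by
  intro n; induction n with
  | zero => rfl
  | succ k ih => simp [ramp, ih]

-- characterization of A for m ≥ 1: find_sums m = [1..K-1] ++ [K + (m - triS K)]
theorem find_sums_eq (m : Int) (hm : 1 ≤ m) (K : Nat) (hK1 : 1 ≤ K)
    (hKle : triS K ≤ m) (hKlt : m < triS (K+1)) :
    find_sums m = (ramp K).tail ++ [(K:Int) + (m - triS K)] := by
  have hphase : fsPhase1 m (m.toNat + 2) [] 0 0 =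
      (if m = triS K then Sum.inr (ramp (K+1)).tail else Sum.inl (ramp (K+2), triS (K+1))) := by
    have h0 : fsPhase1 m (m.toNat + 2) [] 0 0 = fsPhase1 m (m.toNat + 1) (ramp 1) 1 (triS 0) := by
      simp only [fsPhase1, if_pos (by omega : (0:Int) < m)]
      rw [if_neg (by omega : ¬ (0:Int) + 0 = m)]
      simp [ramp, triS]
    rw [h0]
    have hfuel : K + 1 ≤ (m.toNat + 1) + 0 := by
      have h1 : (K:Int) ≤ triS K := le_triS K
      omega
    have := phase1_loop m K hKle hKlt (m.toNat + 1) 0 (by omega) (by simp [triS]; omega) hfuel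
    simpa using this
  unfold find_sums
  rw [hphase]
  split_ifs with heq
  · -- m = triS K : A returned early, result = (ramp (K+1)).tail = [1..K]
    simp only []
    have h1 : (ramp (K+1)).tail = (ramp K).tail ++ [(K:Int)] := by
      simp [ramp, List.tail_append_of_ne_nil (ramp_ne_nil K hK1)]
    rw [h1]
    simp [heq]
  · -- phase 2: one outer iteration, inner loop runs r = m - triS K times
    simp only []
    rw [ramp_length]
    have houter : fsOuter m (K+2) (ramp (K+2)) (triS (K+1)) =
        ((ramp K ++ [(K:Int) + ((m - triS K).toNat : Int)]).tail) := by
      simp only [show K+2 = (K+1)+1 from rfl, fsOuter, ramp_getLast? (K+1), ramp_dropLast (K+1)]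
      have hs' : triS (K+1) - ((K+1:Nat):Int) = triS K := by simp [triS]
      rw [hs']
      have hr1 : 1 ≤ (m - triS K).toNat := by omega
      have hramp : ramp (K+1) = ramp K ++ [(K:Int)] := rfl
      rw [hramp, inner_loop m (m - triS K).toNat (ramp K) (K:Int) (triS K) (m - triS K).toNat
        (by omega) hr1 le_rfl]
    rw [houter]
    rw [List.tail_append_of_ne_nil (ramp_ne_nil K hK1)]
    congr 2
    omega

-- ===== VERDICT (by name: the statement is the Claim_ definition above) =====
theorem find_sums_spec : Claim_equal_find_sums := by
  intro m _ hpre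
  have hm : 1 ≤ m := hpre
  unfold Spec_find_sums find_sums_alt
  rw [if_neg (by omega)]
  obtain ⟨K, hK1, hKeq, hKle, hKlt⟩ :=
    altK_loop m m.toNat 1 le_rfl (by simpa [triS] using hm) (by push_cast; omega)
  norm_num at hKeq
  simp only [hKeq]
  have hfd : PySem.Int.floordiv ((K:Int) * ((K:Int)+1)) 2 = triS K := by
    rw [triS_mul K]; exact floordiv_two_mul _
  rw [hfd, pyRange_ramp K hK1]
  exact find_sums_eq m hm K hK1 hKle hKlt
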